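-- pv_equiv track=rewrite | github.com/gta191977649/Project-Outlier-Music | feature/format.py | format_chord_progression
-- ===== SOURCE A (Python) =====
-- def format_chord_progression(chords, time_signature=4):
--     formatted_progression = []
--     current_bar = []
--     previous_chord = None
--
--     for i, chord in enumerate(chords):
--         if len(current_bar) == time_signature:
--             # Join the chords in the current bar with commas and add to the formatted progression
--             formatted_progression.append('| ' + ' '.join(current_bar) + ' |')
--             current_bar = []
--             previous_chord = None  # Reset previous_chord at the start of a new bar
--
--         if chord == previous_chord:
--             current_bar.append('.')
--         else:
--             current_bar.append(chord)
--             previous_chord = chord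
--
--     # Add the last bar if it's not empty
--     if current_bar:
--         # Fill the remaining slots in the last bar with 'x' if it's not complete
--         current_bar.extend(['.'] * (time_signature - len(current_bar)))
--         formatted_progression.append('| ' + ' '.join(current_bar) + ' |')
--
--     return ' '.join(formatted_progression)
-- ===== SOURCE B (Python) =====
-- def format_chord_progression(chords, time_signature=4):
--     def bars(l):
--         if not l:
--             return []
--         return [l[:time_signature]] + bars(l[time_signature:])
--
--     pieces = []
--     for bar in bars(chords):
--         tokens = bar[:1] + ['.' if c == p else c for p, c in zip(bar, bar[1:])]
--         tokens += ['.'] * (time_signature - len(tokens))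
--         pieces.append('| ' + ' '.join(tokens) + ' |')
--     return ' '.join(pieces)
-- ===== Notes on version B (the rewrite author's own statement) =====
-- stated objective: alternative
-- what changed: Replaces A's single stateful loop (current_bar/previous_chord accumulators with in-loop flushing and a trailing flush) by a chunk-then-format decomposition: recursively slice the chords into bars of time_signature, render each bar by comparing each chord to its immediate predecessor via zip, pad the last bar, and join.
-- outside the precondition, e.g. on format_chord_progression(['C', 'C', 'G'], 0): A returns '|  | | C . G |', B raises RecursionError; on format_chord_progression(['C'], -2): A returns '| C |', B raises RecursionError
import Mathlib
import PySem

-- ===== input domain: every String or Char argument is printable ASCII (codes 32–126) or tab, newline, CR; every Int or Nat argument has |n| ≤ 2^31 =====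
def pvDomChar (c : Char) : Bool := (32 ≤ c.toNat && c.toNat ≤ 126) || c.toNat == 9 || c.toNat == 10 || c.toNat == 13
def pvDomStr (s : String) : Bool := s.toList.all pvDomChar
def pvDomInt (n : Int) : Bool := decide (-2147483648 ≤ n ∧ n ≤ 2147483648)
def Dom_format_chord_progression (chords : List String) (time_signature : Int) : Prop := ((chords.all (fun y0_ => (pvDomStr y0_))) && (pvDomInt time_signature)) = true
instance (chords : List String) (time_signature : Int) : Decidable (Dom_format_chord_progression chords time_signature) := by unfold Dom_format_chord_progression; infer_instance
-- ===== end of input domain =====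

-- B replaces A's single stateful loop (bar/previous-chord accumulators flushed in-loop) by a
-- chunk-then-format decomposition (recursive slicing into bars, zip-based dot compression, padding, join).


-- ===== PORT A =====
-- one loop iteration of A (the index i of Python's enumerate is unused, so the fold runs over the chords
-- directly); state = (formatted_progression, current_bar, previous_chord)
def stepA (ts : Int) (st : List String × List String × Option String) (chord : String) :
    List String × List String × Option String :=
  let st' :=
    if (st.2.1.length : Int) = ts then
      (st.1 ++ ["| " ++ PySem.Str.join " " st.2.1 ++ " |"], ([] : List String), (none : Option String))
    else st
  if some chord = st'.2.2 then (st'.1, st'.2.1 ++ ["."], st'.2.2)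
  else (st'.1, st'.2.1 ++ [chord], some chord)

def format_chord_progression (chords : List String) (time_signature : Int) : String :=
  let st := chords.foldl (stepA time_signature) ([], [], none)
  let fp :=
    if st.2.1 ≠ [] then
      st.1 ++ ["| " ++ PySem.Str.join " "
        (st.2.1 ++ List.replicate (time_signature - (st.2.1.length : Int)).toNat ".") ++ " |"]
    else st.1
  PySem.Str.join " " fp

-- ===== PORT B =====
-- B's recursive helper 'bars'; Python recurses on slices with positive step time_signature (for
-- time_signature ≤ 0 and nonempty input it raises RecursionError — excluded by Pre_); the t = 0
-- guard below only makes the same recursion total.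
def barsB (t : Nat) (l : List String) : List (List String) :=
  if _h : l = [] ∨ t = 0 then []
  else
    PySem.List.slice l none (some (t : Int)) :: barsB t (PySem.List.slice l (some (t : Int)) none)
termination_by l.length
decreasing_by
  simp only [PySem.List.slice_from_natCast]
  rcases l with _ | ⟨c, l'⟩
  · simp at _h
  · have ht : t ≠ 0 := by tauto
    simp [List.length_drop]; omega

def format_chord_progression_alt (chords : List String) (time_signature : Int) : String :=
  let pieces := (barsB time_signature.toNat chords).map (fun bar =>
    let tokens := PySem.List.slice bar none (some 1) ++
      (bar.zip bar.tail).map (fun pc => if pc.2 = pc.1 then "." else pc.2)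
    let tokens := tokens ++ List.replicate (time_signature - (tokens.length : Int)).toNat "."
    "| " ++ PySem.Str.join " " tokens ++ " |")
  PySem.Str.join " " pieces

-- ===== PRECONDITION & SPEC =====
-- Pre_ excludes non-positive time signatures with a nonempty chord list: a time signature ≤ 0 is outside
-- the function's natural domain (A returns quirky artefact strings there, while B's recursive slicing
-- never shrinks the list, i.e. raises RecursionError).
def Pre_format_chord_progression (chords : List String) (time_signature : Int) : Prop :=
  chords = [] ∨ 1 ≤ time_signature
instance (chords : List String) (time_signature : Int) :
    Decidable (Pre_format_chord_progression chords time_signature) := by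
  unfold Pre_format_chord_progression; infer_instance

def pvWitness_format_chord_progression : List String × Int := (["C", "C", "G", "G", "Am"], 4)

def Spec_format_chord_progression (chords : List String) (time_signature : Int) (out : String) : Prop :=
  out = format_chord_progression_alt chords time_signature
instance (chords : List String) (time_signature : Int) (out : String) :
    Decidable (Spec_format_chord_progression chords time_signature out) := by
  unfold Spec_format_chord_progression; infer_instance

-- ===== CLAIM (what is proved, stated in full; the proofs are below) =====
def Claim_equal_format_chord_progression : Prop := ∀ (chords : List String) (time_signature : Int), Dom_format_chord_progression chords time_signature → Pre_format_chord_progression chords time_signature → Spec_format_chord_progression chords time_signature (format_chord_progression chords time_signature)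

-- ===== LEMMAS AND PROOFS =====

-- dot-compressed tokens of a bar: after a previous chord p / from the bar's start
def tokFrom (p : String) : List String → List String
  | [] => []
  | c :: rest => (if c = p then "." else c) :: tokFrom c rest

def tok : List String → List String
  | [] => []
  | c :: rest => c :: tokFrom c rest

-- a bar rendered and padded to t slots
def render (t : Nat) (bar : List String) : String :=
  "| " ++ PySem.Str.join " " (bar ++ List.replicate (t - bar.length) ".") ++ " |"

-- the list of rendered bars: common characterisation both ports are reduced to
def renderedBars (t : Nat) (l : List String) : List String :=
  if _h : l = [] ∨ t = 0 then []
  else render t (tok (l.take t)) :: renderedBars t (l.drop t)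
termination_by l.length
decreasing_by
  rcases l with _ | ⟨c, l'⟩
  · simp at _h
  · have ht : t ≠ 0 := by tauto
    simp [List.length_drop]; omega

theorem length_tokFrom (p : String) (l : List String) : (tokFrom p l).length = l.length := by
  induction l generalizing p with
  | nil => rfl
  | cons c rest ih => simp [tokFrom, ih]

theorem length_tok (l : List String) : (tok l).length = l.length := by
  cases l with
  | nil => rfl
  | cons c rest => simp [tok, length_tokFrom]

theorem getLast?_getD_cons (c p : String) (rest : List String) :
    (c :: rest).getLast?.getD p = rest.getLast?.getD c := by
  cases rest with
  | nil => rfl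
  | cons d r =>
    rcases h : (d :: r).getLast? with _ | x
    · simp [List.getLast?_eq_none_iff] at h
    · simp [h]

-- processing chords inside one bar (no flush can fire)
theorem foldl_inner (t : Nat) (l : List String) :
    ∀ (acc cb : List String) (p : String), cb ≠ [] → cb.length + l.length ≤ t →
    l.foldl (stepA (t : Int)) (acc, cb, some p) = (acc, cb ++ tokFrom p l, some (l.getLast?.getD p)) := by
  induction l with
  | nil => intro acc cb p _ _; simp [tokFrom]
  | cons c rest ih =>
    intro acc cb p hne hlen
    have hlt : cb.length < t := by
      have : 0 < rest.length + 1 := by omega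
      simp only [List.length_cons] at hlen; omega
    have hstep : stepA (t : Int) (acc, cb, some p) c =
        if c = p then (acc, cb ++ ["."], some p) else (acc, cb ++ [c], some c) := by
      simp only [stepA]
      have hne' : ¬ ((cb.length : Int) = (t : Int)) := by omega
      by_cases hc : c = p <;> simp [hne', hc]
    by_cases hc : c = p
    · rw [List.foldl_cons, hstep, if_pos hc]
      rw [ih acc (cb ++ ["."]) p (by simp) (by simp only [List.length_append, List.length_cons] at hlen ⊢; simp; omega)]
      subst hc
      simp [tokFrom, getLast?_getD_cons]
    · rw [List.foldl_cons, hstep, if_neg hc]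
      rw [ih acc (cb ++ [c]) c (by simp) (by simp only [List.length_append, List.length_cons] at hlen ⊢; simp; omega)]
      simp [tokFrom, hc, getLast?_getD_cons]

-- processing a whole (≤ t chords, nonempty) bar from a fresh state
theorem foldl_bar (t : Nat) (ht : 1 ≤ t) (c : String) (rest : List String) (acc : List String)
    (hlen : 1 + rest.length ≤ t) :
    (c :: rest).foldl (stepA (t : Int)) (acc, [], none) =
      (acc, tok (c :: rest), some (rest.getLast?.getD c)) := by
  have hstep : stepA (t : Int) (acc, [], none) c = (acc, [c], some c) := by
    simp only [stepA]
    have h0 : ¬ ((0 : Int) = (t : Int)) := by omega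
    simp [h0]
  rw [List.foldl_cons, hstep, foldl_inner t rest acc [c] c (by simp) (by simpa using hlen)]
  simp [tok]

-- A's flush followed by the next chord = starting that chord from a fresh state
theorem stepA_flush (t : Nat) (ht : 1 ≤ t) (acc cb : List String) (prev : Option String) (d : String)
    (hcb : cb.length = t) :
    stepA (t : Int) (acc, cb, prev) d =
      stepA (t : Int) (acc ++ ["| " ++ PySem.Str.join " " cb ++ " |"], [], none) d := by
  simp only [stepA]
  have h1 : ((cb.length : Nat) : Int) = (t : Int) := by exact_mod_cast congrArg Nat.cast hcb
  have h2 : ¬ ((0 : Int) = (t : Int)) := by omega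
  simp [h1, h2]

-- a full bar renders with no padding
theorem render_full (t : Nat) (bar : List String) (h : bar.length = t) :
    render t bar = "| " ++ PySem.Str.join " " bar ++ " |" := by
  simp [render, h]

-- A's trailing flush, as the port writes it
def finishA (ts : Int) (st : List String × List String × Option String) : List String :=
  if st.2.1 ≠ [] then
    st.1 ++ ["| " ++ PySem.Str.join " "
      (st.2.1 ++ List.replicate (ts - (st.2.1.length : Int)).toNat ".") ++ " |"]
  else st.1

-- A-side characterisation
theorem mainA (t : Nat) (ht : 1 ≤ t) (n : Nat) :
    ∀ (l : List String), l.length ≤ n → ∀ (acc : List String),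
      finishA (t : Int) (l.foldl (stepA (t : Int)) (acc, [], none)) = acc ++ renderedBars t l := by
  induction n with
  | zero =>
    intro l hl acc
    have : l = [] := List.eq_nil_of_length_eq_zero (Nat.le_zero.mp hl)
    subst this
    simp [finishA, renderedBars]
  | succ n ih =>
    intro l hl acc
    rcases l with _ | ⟨c, rest⟩
    · simp [finishA, renderedBars]
    · have hne : ¬ ((c :: rest) = [] ∨ t = 0) := by simp; omega
      by_cases hle : rest.length + 1 ≤ t
      · rw [foldl_bar t ht c rest acc (by omega)]
        have htake : (c :: rest).take t = c :: rest := List.take_of_length_le (by simp; omega)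
        have hdrop : (c :: rest).drop t = [] := List.drop_eq_nil_of_le (by simp; omega)
        rw [renderedBars, dif_neg hne, htake, hdrop, renderedBars]
        simp [finishA, render, tok, length_tokFrom]
        have hrep : ((t : Int) - ((rest.length : Int) + 1)).toNat = t - (rest.length + 1) := by omega
        rw [hrep]
      · obtain ⟨t', rfl⟩ : ∃ t', t = t' + 1 := ⟨t - 1, by omega⟩
        have htake : (c :: rest).take (t' + 1) = c :: rest.take t' := by
          simp [List.take_succ_cons]
        have htklen : (rest.take t').length = t' := by
          simp [List.length_take]; omega
        obtain ⟨d, rest2, hd⟩ : ∃ d rest2, (c :: rest).drop (t' + 1) = d :: rest2 := by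
          rcases hcase : (c :: rest).drop (t' + 1) with _ | ⟨d, rest2⟩
          · exfalso
            have := congrArg List.length hcase
            simp at this; omega
          · exact ⟨d, rest2, rfl⟩
        have hsplit : c :: rest = (c :: rest).take (t' + 1) ++ (c :: rest).drop (t' + 1) :=
          (List.take_append_drop _ _).symm
        conv_lhs => rw [hsplit, List.foldl_append, htake]
        rw [foldl_bar (t' + 1) ht c (rest.take t') acc (by rw [htklen]; omega),
          hd, List.foldl_cons,
          stepA_flush (t' + 1) ht _ _ _ d (by simp [length_tok, htklen]),
          ← List.foldl_cons, ← hd,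
          ih ((c :: rest).drop (t' + 1))
            (by simp only [List.length_drop, List.length_cons]
                simp only [List.length_cons] at hl
                omega) _]
        conv_rhs => rw [renderedBars]
        rw [dif_neg hne, htake]
        rw [render_full (t' + 1) (tok (c :: rest.take t')) (by simp [length_tok, htklen])]
        simp

-- zip-with-predecessor computes tokFrom
theorem zip_map_tok (rest : List String) : ∀ (p : String),
    (((p :: rest).zip rest).map (fun pc => if pc.2 = pc.1 then "." else pc.2)) = tokFrom p rest := by
  induction rest with
  | nil => intro p; rfl
  | cons d rest' ih => intro p; simp [List.zip_cons_cons, tokFrom, ih]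

-- B's per-bar token list is tok
theorem tok_eq (bar : List String) :
    PySem.List.slice bar none (some 1) ++
      (bar.zip bar.tail).map (fun pc => if pc.2 = pc.1 then "." else pc.2) = tok bar := by
  have h1 : PySem.List.slice bar none (some 1) = bar.take 1 := by
    have := PySem.List.slice_to_natCast (xs := bar) (b := 1)
    simpa using this
  rcases bar with _ | ⟨c, rest⟩
  · simp [h1, tok]
  · rw [h1]
    simp only [List.take_succ_cons, List.take_zero, List.tail_cons]
    rw [List.singleton_append, zip_map_tok rest c]
    rfl

-- B-side characterisation
theorem mainB (t : Nat) (ht : 1 ≤ t) (n : Nat) :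
    ∀ (l : List String), l.length ≤ n →
    (barsB t l).map (fun bar =>
      let tokens := PySem.List.slice bar none (some 1) ++
        (bar.zip bar.tail).map (fun pc => if pc.2 = pc.1 then "." else pc.2)
      let tokens := tokens ++ List.replicate ((t : Int) - (tokens.length : Int)).toNat "."
      "| " ++ PySem.Str.join " " tokens ++ " |") = renderedBars t l := by
  induction n with
  | zero =>
    intro l hl
    have : l = [] := List.eq_nil_of_length_eq_zero (Nat.le_zero.mp hl)
    subst this
    simp [barsB, renderedBars]
  | succ n ih =>
    intro l hl
    rcases l with _ | ⟨c, rest⟩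
    · simp [barsB, renderedBars]
    · have hne : ¬ ((c :: rest) = [] ∨ t = 0) := by simp; omega
      rw [barsB, dif_neg hne, renderedBars, dif_neg hne]
      have hto : PySem.List.slice (c :: rest) none (some (t : Int)) = (c :: rest).take t :=
        PySem.List.slice_to_natCast (xs := c :: rest) (b := t)
      have hfrom : PySem.List.slice (c :: rest) (some (t : Int)) none = (c :: rest).drop t :=
        PySem.List.slice_from_natCast (xs := c :: rest) (a := t)
      rw [List.map_cons, hto, hfrom,
        ih ((c :: rest).drop t)
          (by simp only [List.length_drop, List.length_cons]
              simp only [List.length_cons] at hl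
              omega)]
      congr 1
      simp only [tok_eq]
      simp [render, length_tok]
      have hrep : ((t : Int) - min (t : Int) ((rest.length : Int) + 1)).toNat =
          t - min t (rest.length + 1) := by omega
      rw [hrep]

-- the ports, re-expressed through the characterisations
theorem portA_eq (chords : List String) (ts : Int) :
    format_chord_progression chords ts =
      PySem.Str.join " " (finishA ts (chords.foldl (stepA ts) ([], [], none))) := rfl

-- ===== VERDICT (by name: the statement is the Claim_ definition above) =====
theorem format_chord_progression_spec : Claim_equal_format_chord_progression := by
  unfold Claim_equal_format_chord_progression
  intro chords ts _hdom hpre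
  unfold Spec_format_chord_progression
  rcases hpre with hnil | hpos
  · subst hnil
    simp [format_chord_progression, format_chord_progression_alt, barsB]
  · have hts : ((ts.toNat : Nat) : Int) = ts := Int.toNat_of_nonneg (by omega)
    obtain ⟨t, rfl⟩ : ∃ t : Nat, ts = (t : Int) := ⟨ts.toNat, hts.symm⟩
    have ht1 : 1 ≤ t := by exact_mod_cast hpos
    rw [portA_eq]
    rw [mainA t ht1 chords.length chords le_rfl []]
    unfold format_chord_progression_alt
    simp only [Int.toNat_natCast]
    rw [mainB t ht1 chords.length chords le_rfl]
    simp
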